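-- pv_equiv track=rewrite | github.com/Abdelilah04116/fidelobot2 | SMA/agents/agent_orchestrator.py | _determine_execution_order
-- ===== SOURCE A (Python) =====
-- from typing import Dict, Any, List, Optional
--
-- def _determine_execution_order(required_agents: Dict[str, Any]) -> List[str]:
--     """Déterminer l'ordre d'exécution des agents"""
--     try:
--         # Priorités d'exécution
--         priority_order = ["critical", "high", "medium", "low"]
--
--         # Trier les agents par priorité
--         sorted_agents = sorted(
--             required_agents.items(),
--             key=lambda x: priority_order.index(x[1]["priority"])
--         )
--
--         return [agent_name for agent_name, _ in sorted_agents]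
--
--     except Exception:
--         return list(required_agents.keys())
-- ===== SOURCE B (Python) =====
-- def _determine_execution_order(required_agents):
--     """Single-pass bucketing by priority instead of sorting."""
--     try:
--         buckets = {"critical": [], "high": [], "medium": [], "low": []}
--         for agent_name, info in required_agents.items():
--             buckets[info["priority"]].append(agent_name)
--         return buckets["critical"] + buckets["high"] + buckets["medium"] + buckets["low"]
--     except Exception:
--         return list(required_agents.keys())
-- ===== Notes on version B (the rewrite author's own statement) =====
-- stated objective: alternative
-- what changed: replaces the stable sort keyed by priority_order.index with a single pass that appends each agent into one of four explicit priority buckets and concatenates them, keeping the same except-fallback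
import Mathlib
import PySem

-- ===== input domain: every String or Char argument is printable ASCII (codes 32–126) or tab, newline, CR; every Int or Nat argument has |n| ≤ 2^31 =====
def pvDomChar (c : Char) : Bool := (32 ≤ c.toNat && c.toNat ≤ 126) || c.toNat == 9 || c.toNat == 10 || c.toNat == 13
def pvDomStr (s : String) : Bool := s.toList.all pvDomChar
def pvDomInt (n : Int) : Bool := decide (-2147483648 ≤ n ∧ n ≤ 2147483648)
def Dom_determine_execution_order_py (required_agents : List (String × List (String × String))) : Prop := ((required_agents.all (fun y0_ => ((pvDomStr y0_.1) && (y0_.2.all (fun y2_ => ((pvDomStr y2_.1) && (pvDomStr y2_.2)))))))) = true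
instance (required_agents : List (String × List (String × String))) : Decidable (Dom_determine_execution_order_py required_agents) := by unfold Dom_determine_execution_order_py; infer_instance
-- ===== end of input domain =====

-- B replaces A's stable sort (keyed by priority_order.index) with one pass into four
-- explicit priority buckets that are then concatenated; same except-fallback (objective: alternative).

-- first-match lookup info["priority"] on the inner dict (assoc list)
def pvGetPriority (info : List (String × String)) : Option String :=
  (info.find? (fun kv => kv.1 == "priority")).map (fun kv => kv.2)

-- ===== PORT A =====
def pvPrioOrder : List String := ["critical", "high", "medium", "low"]

-- the sort key priority_order.index(x[1]["priority"]); none = the exception A's except catches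
def pvKeyA (info : List (String × String)) : Option Nat :=
  (pvGetPriority info).bind (fun p => PySem.List.index? pvPrioOrder p)

def determine_execution_order_py (required_agents : List (String × List (String × String))) : List String :=
  if required_agents.all (fun kv => (pvKeyA kv.2).isSome) then
    (PySem.List.sorted required_agents (fun kv => (pvKeyA kv.2).getD 0)).map Prod.fst
  else
    required_agents.map Prod.fst

-- ===== PORT B =====
-- one loop step: append the name into its bucket; none = the KeyError B's except catches
def pvStepB (st : Option (List String × List String × List String × List String))
    (kv : String × List (String × String)) :
    Option (List String × List String × List String × List String) :=
  st.bind (fun b =>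
    match pvGetPriority kv.2 with
    | some "critical" => some (b.1 ++ [kv.1], b.2.1, b.2.2.1, b.2.2.2)
    | some "high"     => some (b.1, b.2.1 ++ [kv.1], b.2.2.1, b.2.2.2)
    | some "medium"   => some (b.1, b.2.1, b.2.2.1 ++ [kv.1], b.2.2.2)
    | some "low"      => some (b.1, b.2.1, b.2.2.1, b.2.2.2 ++ [kv.1])
    | _ => none)

def determine_execution_order_py_alt (required_agents : List (String × List (String × String))) : List String :=
  match required_agents.foldl pvStepB (some ([], [], [], [])) with
  | some (c, h, m, l) => c ++ h ++ m ++ l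
  | none => required_agents.map Prod.fst

-- ===== PRECONDITION & SPEC =====
def Spec_determine_execution_order_py (required_agents : List (String × List (String × String))) (out : List String) : Prop := out = determine_execution_order_py_alt required_agents
instance (required_agents : List (String × List (String × String))) (out : List String) : Decidable (Spec_determine_execution_order_py required_agents out) := by unfold Spec_determine_execution_order_py; infer_instance

-- ===== CLAIM (what is proved, stated in full; the proofs are below) =====
def Claim_equal_determine_execution_order_py : Prop := ∀ (required_agents : List (String × List (String × String))), Dom_determine_execution_order_py required_agents → Spec_determine_execution_order_py required_agents (determine_execution_order_py required_agents)

-- ===== LEMMAS AND PROOFS =====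

-- abbreviation used in the proofs: the Nat sort key of A (total, only used where isSome)
def pvK (kv : String × List (String × String)) : Nat := (pvKeyA kv.2).getD 0

-- the pairs of xs whose key is i, in order
def pvF (i : Nat) (xs : List (String × List (String × String))) : List (String × List (String × String)) :=
  xs.filter (fun kv => pvK kv == i)

lemma pvF_cons (i : Nat) (x : String × List (String × String)) (xs : List (String × List (String × String))) :
    pvF i (x :: xs) = if pvK x == i then x :: pvF i xs else pvF i xs := by
  simp [pvF, List.filter_cons]

lemma foldB_none (xs : List (String × List (String × String))) :
    xs.foldl pvStepB none = none := by
  induction xs with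
  | nil => rfl
  | cons x xs ih => simpa [pvStepB] using ih

lemma stepB_none {x : String × List (String × String)} (h : pvKeyA x.2 = none)
    (b : List String × List String × List String × List String) :
    pvStepB (some b) x = none := by
  unfold pvStepB
  rcases hp : pvGetPriority x.2 with _ | p
  · simp
  · have hidx : PySem.List.index? pvPrioOrder p = none := by
      simpa [pvKeyA, hp] using h
    have hmem : p ∉ pvPrioOrder := by
      rw [PySem.List.index?_eq_none_iff] at hidx; exact hidx
    simp only [pvPrioOrder, List.mem_cons, List.not_mem_nil, or_false, not_or] at hmem
    obtain ⟨h1, h2, h3, h4⟩ := hmem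
    simp only [Option.bind_some]
    split
    all_goals first | rfl | (rename_i heq; simp_all)

lemma foldB_some :
    ∀ (xs : List (String × List (String × String))) (c h m l : List String),
    (∀ kv ∈ xs, (pvKeyA kv.2).isSome) →
    xs.foldl pvStepB (some (c, h, m, l)) =
      some (c ++ (pvF 0 xs).map Prod.fst, h ++ (pvF 1 xs).map Prod.fst,
            m ++ (pvF 2 xs).map Prod.fst, l ++ (pvF 3 xs).map Prod.fst) := by
  intro xs
  induction xs with
  | nil => intro c h m l _; simp [pvF]
  | cons x xs ih =>
    intro c h m l hall
    have hx : (pvKeyA x.2).isSome := hall x (by simp)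
    rcases hp : pvGetPriority x.2 with _ | p
    · simp [pvKeyA, hp] at hx
    · have hpm : p ∈ pvPrioOrder := by
        simpa [pvKeyA, hp, PySem.List.index?_isSome_iff] using hx
      have htail : ∀ kv ∈ xs, (pvKeyA kv.2).isSome := fun kv hm => hall kv (by simp [hm])
      simp only [pvPrioOrder, List.mem_cons, List.not_mem_nil, or_false] at hpm
      rcases hpm with rfl | rfl | rfl | rfl
      · have hk : pvK x = 0 := by
          have h0 : pvKeyA x.2 = some 0 := by simp only [pvKeyA, hp, Option.bind_some]; rfl
          simp [pvK, h0]
        simp only [List.foldl_cons, pvStepB, hp, Option.bind_some]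
        rw [ih _ _ _ _ htail]
        simp [pvF_cons, hk]
      · have hk : pvK x = 1 := by
          have h0 : pvKeyA x.2 = some 1 := by simp only [pvKeyA, hp, Option.bind_some]; rfl
          simp [pvK, h0]
        simp only [List.foldl_cons, pvStepB, hp, Option.bind_some]
        rw [ih _ _ _ _ htail]
        simp [pvF_cons, hk]
      · have hk : pvK x = 2 := by
          have h0 : pvKeyA x.2 = some 2 := by simp only [pvKeyA, hp, Option.bind_some]; rfl
          simp [pvK, h0]
        simp only [List.foldl_cons, pvStepB, hp, Option.bind_some]
        rw [ih _ _ _ _ htail]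
        simp [pvF_cons, hk]
      · have hk : pvK x = 3 := by
          have h0 : pvKeyA x.2 = some 3 := by simp only [pvKeyA, hp, Option.bind_some]; rfl
          simp [pvK, h0]
        simp only [List.foldl_cons, pvStepB, hp, Option.bind_some]
        rw [ih _ _ _ _ htail]
        simp [pvF_cons, hk]

lemma foldB_bad :
    ∀ (xs : List (String × List (String × String))) (b : List String × List String × List String × List String),
    ¬ (∀ kv ∈ xs, (pvKeyA kv.2).isSome) →
    xs.foldl pvStepB (some b) = none := by
  intro xs
  induction xs with
  | nil => intro b h; exact absurd (by simp) h
  | cons x xs ih =>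
    intro b h
    rcases hx : pvKeyA x.2 with _ | k
    · rw [List.foldl_cons, stepB_none hx]; exact foldB_none xs
    · have htail : ¬ (∀ kv ∈ xs, (pvKeyA kv.2).isSome) := by
        intro hall
        apply h
        intro kv hm
        rcases List.mem_cons.mp hm with rfl | hm'
        · simp [hx]
        · exact hall kv hm'
      rw [List.foldl_cons]
      rcases hst : pvStepB (some b) x with _ | b'
      · exact foldB_none xs
      · exact ih b' htail

lemma insertBy_mid (before : (String × List (String × String)) → (String × List (String × String)) → Bool)
    (x : String × List (String × String)) :
    ∀ (ys zs : List (String × List (String × String))),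
    (∀ y ∈ ys, before x y = false) → (∀ z ∈ zs, before x z = true) →
    PySem.List.insertBy before x (ys ++ zs) = ys ++ x :: zs := by
  intro ys
  induction ys with
  | nil =>
    intro zs _ h2
    cases zs with
    | nil => simp [PySem.List.insertBy]
    | cons z t => simp [PySem.List.insertBy, h2 z (by simp)]
  | cons y ys ih =>
    intro zs h1 h2
    have hy : before x y = false := h1 y (by simp)
    simp only [List.cons_append, PySem.List.insertBy, hy]
    simpa using ih zs (fun y' hm => h1 y' (by simp [hm])) h2

lemma key_le_three {kv : String × List (String × String)} (h : (pvKeyA kv.2).isSome) : pvK kv ≤ 3 := by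
  rcases hk : pvKeyA kv.2 with _ | k
  · simp [hk] at h
  · have : pvK kv = k := by simp [pvK, hk]
    rw [this]
    rcases hp : pvGetPriority kv.2 with _ | p
    · simp [pvKeyA, hp] at hk
    · have hidx : PySem.List.index? pvPrioOrder p = some k := by simpa [pvKeyA, hp] using hk
      obtain ⟨hlt, -, -⟩ := PySem.List.getElem_of_index?_eq_some hidx
      simpa [pvPrioOrder] using Nat.lt_succ_iff.mp (by simpa [pvPrioOrder] using hlt)

lemma foldA :
    ∀ (xs b0 b1 b2 b3 : List (String × List (String × String))),
    (∀ y ∈ b0, pvK y = 0) → (∀ y ∈ b1, pvK y = 1) → (∀ y ∈ b2, pvK y = 2) → (∀ y ∈ b3, pvK y = 3) →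
    (∀ x ∈ xs, pvK x ≤ 3) →
    xs.foldl (fun acc x => PySem.List.insertBy (fun a b => decide (pvK a < pvK b)) x acc)
      (b0 ++ b1 ++ b2 ++ b3) =
      (b0 ++ pvF 0 xs) ++ (b1 ++ pvF 1 xs) ++ (b2 ++ pvF 2 xs) ++ (b3 ++ pvF 3 xs) := by
  intro xs
  induction xs with
  | nil => intro b0 b1 b2 b3 _ _ _ _ _; simp [pvF]
  | cons x xs ih =>
    intro b0 b1 b2 b3 h0 h1 h2 h3 hle
    have hx : pvK x ≤ 3 := hle x (by simp)
    have htail : ∀ y ∈ xs, pvK y ≤ 3 := fun y hm => hle y (by simp [hm])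
    rw [List.foldl_cons]
    interval_cases hj : (pvK x)
    · have : PySem.List.insertBy (fun a b => decide (pvK a < pvK b)) x (b0 ++ b1 ++ b2 ++ b3)
          = (b0 ++ [x]) ++ b1 ++ b2 ++ b3 := by
        have := insertBy_mid (fun a b => decide (pvK a < pvK b)) x b0 (b1 ++ b2 ++ b3)
          (by intro y hm; simp [h0 y hm, hj])
          (by intro z hm; simp only [List.mem_append] at hm
              rcases hm with (hm | hm) | hm <;> simp [h1 z, h2 z, h3 z, hm, hj])
        simpa [List.append_assoc] using this
      rw [this, ih (b0 ++ [x]) b1 b2 b3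
        (by intro y hm; rcases List.mem_append.mp hm with hm' | hm'
            · exact h0 y hm'
            · simp at hm'; subst hm'; exact hj) h1 h2 h3 htail]
      simp [pvF_cons, hj, List.append_assoc]
    · have : PySem.List.insertBy (fun a b => decide (pvK a < pvK b)) x (b0 ++ b1 ++ b2 ++ b3)
          = b0 ++ (b1 ++ [x]) ++ b2 ++ b3 := by
        have := insertBy_mid (fun a b => decide (pvK a < pvK b)) x (b0 ++ b1) (b2 ++ b3)
          (by intro y hm; rcases List.mem_append.mp hm with hm' | hm' <;>
                simp [h0 y, h1 y, hm', hj])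
          (by intro z hm; rcases List.mem_append.mp hm with hm' | hm' <;>
                simp [h2 z, h3 z, hm', hj])
        simpa [List.append_assoc] using this
      rw [this, ih b0 (b1 ++ [x]) b2 b3 h0
        (by intro y hm; rcases List.mem_append.mp hm with hm' | hm'
            · exact h1 y hm'
            · simp at hm'; subst hm'; exact hj) h2 h3 htail]
      simp [pvF_cons, hj, List.append_assoc]
    · have : PySem.List.insertBy (fun a b => decide (pvK a < pvK b)) x (b0 ++ b1 ++ b2 ++ b3)
          = b0 ++ b1 ++ (b2 ++ [x]) ++ b3 := by
        have := insertBy_mid (fun a b => decide (pvK a < pvK b)) x (b0 ++ b1 ++ b2) b3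
          (by intro y hm; simp only [List.mem_append] at hm
              rcases hm with (hm | hm) | hm <;> simp [h0 y, h1 y, h2 y, hm, hj])
          (by intro z hm; simp [h3 z, hm, hj])
        simpa [List.append_assoc] using this
      rw [this, ih b0 b1 (b2 ++ [x]) b3 h0 h1
        (by intro y hm; rcases List.mem_append.mp hm with hm' | hm'
            · exact h2 y hm'
            · simp at hm'; subst hm'; exact hj) h3 htail]
      simp [pvF_cons, hj, List.append_assoc]
    · have : PySem.List.insertBy (fun a b => decide (pvK a < pvK b)) x (b0 ++ b1 ++ b2 ++ b3)
          = b0 ++ b1 ++ b2 ++ (b3 ++ [x]) := by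
        have := insertBy_mid (fun a b => decide (pvK a < pvK b)) x (b0 ++ b1 ++ b2 ++ b3) []
          (by intro y hm; simp only [List.mem_append] at hm
              rcases hm with ((hm | hm) | hm) | hm <;> simp [h0 y, h1 y, h2 y, h3 y, hm, hj])
          (by intro z hm; simp at hm)
        simpa [List.append_assoc] using this
      rw [this, ih b0 b1 b2 (b3 ++ [x]) h0 h1 h2
        (by intro y hm; rcases List.mem_append.mp hm with hm' | hm'
            · exact h3 y hm'
            · simp at hm'; subst hm'; exact hj) htail]
      simp [pvF_cons, hj, List.append_assoc]

-- ===== VERDICT (by name: the statement is the Claim_ definition above) =====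
theorem determine_execution_order_py_spec : Claim_equal_determine_execution_order_py := by
  intro ras _
  unfold Spec_determine_execution_order_py determine_execution_order_py determine_execution_order_py_alt
  by_cases hall : ∀ kv ∈ ras, (pvKeyA kv.2).isSome
  · have hd : ras.all (fun kv => (pvKeyA kv.2).isSome) = true := by
      rw [List.all_eq_true]; intro kv hm; exact hall kv hm
    rw [if_pos hd, foldB_some ras [] [] [] [] hall]
    have hsort : PySem.List.sorted ras (fun kv => (pvKeyA kv.2).getD 0)
        = pvF 0 ras ++ pvF 1 ras ++ pvF 2 ras ++ pvF 3 ras := by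
      have heq : (fun kv : String × List (String × String) => (pvKeyA kv.2).getD 0) = pvK := rfl
      rw [heq, PySem.List.sorted_eq_foldl_insertBy]
      simpa using foldA ras [] [] [] [] (by simp) (by simp) (by simp) (by simp)
        (fun x hm => key_le_three (hall x hm))
    rw [hsort]
    simp [List.append_assoc]
  · have hd : ras.all (fun kv => (pvKeyA kv.2).isSome) ≠ true := by
      intro h
      exact hall (fun kv hm => List.all_eq_true.mp h kv hm)
    rw [if_neg hd, foldB_bad ras _ hall]
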